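-- pv_equiv track=rewrite | github.com/dhberg92/Google-FB | lvl1/foobar_1.py | answer
-- ===== SOURCE A (Python) =====
-- def answer(data, n):
-- 	dic = {}
-- 	ans = []
--
-- 	for x in data:
-- 		if x in dic:
-- 			dic[x] += 1
-- 		else:
-- 			dic[x] = 1
--
-- 	for x in data:
-- 		if dic[x] <= n:
-- 			ans.append(x)
--
-- 	return ans
-- ===== SOURCE B (Python) =====
-- def answer(data, n):
-- 	ans = list(data)
-- 	for v in set(data):
-- 		if data.count(v) > n:
-- 			ans = [x for x in ans if x != v]
-- 	return ans
-- ===== Notes on version B (the rewrite author's own statement) =====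
-- stated objective: alternative
-- what changed: Instead of counting into a dict and then filtering each element by its count, B starts from a copy of the whole list and, iterating over the distinct values, deletes all occurrences of every value that appears more than n times (order-independent deletions, so set iteration order does not matter).
import Mathlib
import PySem

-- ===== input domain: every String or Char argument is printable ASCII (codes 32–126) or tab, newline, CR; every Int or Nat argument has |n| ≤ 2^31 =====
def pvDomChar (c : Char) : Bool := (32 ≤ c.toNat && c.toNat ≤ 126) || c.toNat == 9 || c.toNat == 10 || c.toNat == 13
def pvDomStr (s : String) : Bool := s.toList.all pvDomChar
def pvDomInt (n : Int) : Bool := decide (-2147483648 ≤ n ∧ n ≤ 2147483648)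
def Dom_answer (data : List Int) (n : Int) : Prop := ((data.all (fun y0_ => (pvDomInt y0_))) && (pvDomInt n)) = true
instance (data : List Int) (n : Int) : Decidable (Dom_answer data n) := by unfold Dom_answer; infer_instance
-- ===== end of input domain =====

-- B deletes every over-frequent value from a copy of the list (iterating over the
-- distinct values) instead of A's count-into-a-dict then per-element filter pass.


-- ===== PORT A =====
def answer (data : List Int) (n : Int) : List Int :=
  let dic : PySem.Dict Int Int :=
    data.foldl (fun dic x =>
      if dic.contains x then dic.modify x 0 (· + 1) else dic.insert x 1)
      PySem.Dict.empty
  let ans : List Int :=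
    data.foldl (fun ans x => if dic.getD x 0 ≤ n then ans ++ [x] else ans) []
  ans

-- ===== PORT B =====
-- B iterates over set(data); the deletions commute, so the result does not depend
-- on Python's set iteration order and PySem.Set.ofList's order is faithful.
def answer_alt (data : List Int) (n : Int) : List Int :=
  (PySem.Set.ofList data).foldl
    (fun ans v =>
      if n < (PySem.List.count data v : Int) then ans.filter (fun x => x != v) else ans)
    data

-- ===== PRECONDITION & SPEC =====
def Spec_answer (data : List Int) (n : Int) (out : List Int) : Prop := out = answer_alt data n
instance (data : List Int) (n : Int) (out : List Int) : Decidable (Spec_answer data n out) := by unfold Spec_answer; infer_instance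

-- ===== CLAIM (what is proved, stated in full; the proofs are below) =====
def Claim_equal_answer : Prop := ∀ (data : List Int) (n : Int), Dom_answer data n → Spec_answer data n (answer data n)

-- ===== LEMMAS AND PROOFS =====

-- A's counting loop computes the occurrence count of every value.
theorem getD_count_loop (l : List Int) (d : PySem.Dict Int Int) (v : Int) :
    (l.foldl (fun dic x =>
      if dic.contains x then dic.modify x 0 (· + 1) else dic.insert x 1) d).getD v 0
      = d.getD v 0 + l.count v := by
  induction l generalizing d with
  | nil => simp
  | cons x l ih =>
    simp only [List.foldl_cons, ih, List.count_cons, beq_iff_eq]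
    by_cases hc : d.contains x = true
    · rw [if_pos hc, PySem.Dict.getD_modify]
      by_cases hv : v = x
      · subst hv; simp; ring
      · rw [if_neg hv, if_neg (Ne.symm hv)]; push_cast; ring
    · rw [if_neg hc, PySem.Dict.getD_insert]
      by_cases hv : v = x
      · subst hv
        rw [if_pos rfl, if_pos rfl,
          PySem.Dict.getD_of_not_contains (h := by simp_all)]
        push_cast; ring
      · rw [if_neg hv, if_neg (Ne.symm hv)]; push_cast; ring

-- B's deletion loop equals one filter keeping x unless some processed value v = x
-- is over-frequent.
theorem delete_fold (data : List Int) (n : Int) (vs acc : List Int) :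
    vs.foldl
      (fun ans v =>
        if n < (PySem.List.count data v : Int) then ans.filter (fun x => x != v) else ans)
      acc
    = acc.filter (fun x => vs.all (fun v => !(x == v && n < (PySem.List.count data v : Int)))) := by
  induction vs generalizing acc with
  | nil => simp
  | cons v vs ih =>
    simp only [List.foldl_cons, ih, List.all_cons]
    by_cases hc : n < (PySem.List.count data v : Int)
    · rw [if_pos hc, List.filter_filter]
      apply List.filter_congr
      intro x _
      by_cases hx : x = v
      · subst hx
        simp only [PySem.List.count_eq] at hc
        simp only [bne_self_eq_false, beq_self_eq_true, Bool.true_and]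
        simp [hc]
      · have h1 : (x == v) = false := by simp [hx]
        have h2 : (x != v) = true := by simp [bne, h1]
        simp [h1, h2]
    · rw [if_neg hc]
      apply List.filter_congr
      intro x _
      by_cases hx : x = v
      · subst hx
        simp only [PySem.List.count_eq] at hc
        simp [not_lt.mp hc]
      · have h1 : (x == v) = false := by simp [hx]
        simp [h1]

-- ===== VERDICT (by name: the statement is the Claim_ definition above) =====
theorem answer_spec : Claim_equal_answer := by
  intro data n _
  unfold Spec_answer answer answer_alt
  simp only [PySem.List.foldl_append_ite_eq_filter, List.nil_append, delete_fold]
  apply List.filter_congr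
  intro x hx
  have hmem : x ∈ PySem.Set.ofList data := by
    rw [PySem.Set.mem_ofList]; exact hx
  simp only [getD_count_loop, PySem.List.count_eq, PySem.Dict.getD_empty, zero_add]
  by_cases h : (data.count x : Int) ≤ n
  · rw [decide_eq_true h]
    symm
    rw [List.all_eq_true]
    intro v _
    by_cases hvx : x = v
    · subst hvx
      simp [not_lt.mpr h]
    · simp [hvx]
  · rw [decide_eq_false h]
    symm
    rw [List.all_eq_false]
    exact ⟨x, hmem, by simp [not_le.mp h]⟩
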